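-- pv_equiv track=rewrite | github.com/TheCDC/Project-Euler | euler/solutions/euler_060.py | clique_recursive
-- ===== SOURCE A (Python) =====
-- def clique_recursive(n: int, node_edges: dict[int, set[int]], current: set = None):
--     def red(a: set, b: set):
--         return a & b
--
--     if n == 0:  # base case
--         yield current
--     if current is None:
--         for n in node_edges:
--             yield from clique_recursive(n - 1, node_edges, set([n]))
--         return
--     edge_sets = list(node_edges.get(e, set()) for e in current)
--     s = None
--     for es in edge_sets:
--         if s is None:
--             s = es
--         s = red(s, es)
--     if s is None:
--         return
--     for i in s:
--         yield from clique_recursive(n - 1, node_edges, current | set([i]))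
-- ===== SOURCE B (Python) =====
-- def clique_recursive(n: int, node_edges: dict[int, set[int]], current: set = None):
--     # DFS that carries (members, candidate set) down the recursion: the running
--     # intersection of the members' neighborhoods is narrowed by one set per step
--     # instead of being recomputed over all members, and branches whose size
--     # budget is already spent are pruned instead of being explored to exhaustion.
--     def grow(k, members, cands):
--         if k == 0:
--             yield set(members)
--             return
--         if k < 0:
--             return
--         for i in cands:
--             yield from grow(k - 1, members | {i}, cands & node_edges.get(i, set()))
--
--     if current is None:
--         for v in node_edges:
--             yield from grow(v - 1, {v}, node_edges.get(v, set()))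
--         return
--     members = set(current)
--     lst = list(current)
--     cands = set()
--     if lst:
--         cands = node_edges.get(lst[0], set())
--         for e in lst[1:]:
--             cands = cands & node_edges.get(e, set())
--     yield from grow(n, members, cands)
-- ===== Notes on version B (the rewrite author's own statement) =====
-- stated objective: alternative
-- what changed: B carries the running neighborhood-intersection (candidate set) down the DFS, narrowing it by one set per step instead of recomputing the intersection over all current members at every node, and it prunes a branch as soon as the size budget is spent instead of recursing with negative n through every extension.
-- outside the precondition, e.g. on clique_recursive(0, {}, None): A returns [None], B returns []
import Mathlib
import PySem

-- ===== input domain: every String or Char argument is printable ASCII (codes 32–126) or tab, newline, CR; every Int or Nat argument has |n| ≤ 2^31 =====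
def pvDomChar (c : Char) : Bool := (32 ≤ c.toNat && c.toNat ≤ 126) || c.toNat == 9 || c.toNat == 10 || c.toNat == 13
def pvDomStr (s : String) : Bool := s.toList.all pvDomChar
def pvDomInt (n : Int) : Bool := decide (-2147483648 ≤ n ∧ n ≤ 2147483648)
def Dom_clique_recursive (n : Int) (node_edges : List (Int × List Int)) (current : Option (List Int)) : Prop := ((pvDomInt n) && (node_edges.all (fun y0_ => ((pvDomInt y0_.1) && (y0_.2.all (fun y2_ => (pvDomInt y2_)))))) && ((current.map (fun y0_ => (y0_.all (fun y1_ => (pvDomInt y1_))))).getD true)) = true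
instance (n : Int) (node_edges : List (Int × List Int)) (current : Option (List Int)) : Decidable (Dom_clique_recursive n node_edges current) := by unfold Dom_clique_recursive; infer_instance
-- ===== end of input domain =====

-- B carries the running neighborhood intersection down the DFS and prunes once the size
-- budget is spent, instead of recomputing the intersection over all members at every node
-- and exploring exhausted branches; equality of RETURN values is proved (the Python
-- originals are generators; their yielded sequences are compared as sets).

-- ===== PORT A =====
-- adjacency lookup node_edges.get(e, set())
def cliqueAdj (ne : List (Int × List Int)) (e : Int) : List Int :=
  (PySem.Dict.mk ne).getD e []

-- fuel bound making the recursion total in Lean; under Pre_ (no self-loop) the recursion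
-- depth is at most one more than the number of neighbor entries, so the fuel never runs out
def cliqueFuel (ne : List (Int × List Int)) : Nat :=
  ne.foldl (fun a p => a + p.2.length) 0 + 2

-- body of A for a non-None current (every recursive call of the Python has current a set)
def cliqueGoA (ne : List (Int × List Int)) : Nat → Int → List Int → List (List Int)
  | 0, _, _ => []
  | fuel+1, n, cur =>
    (if n = 0 then [cur] else []) ++
    (let edge_sets := cur.map (cliqueAdj ne)
     match edge_sets.foldl
         (fun s es => some (PySem.Set.inter (s.getD es) es)) (none : Option (List Int)) with
     | none => []
     | some s =>
       s.foldl (fun acc i => acc ++ cliqueGoA ne fuel (n - 1) (PySem.Set.add cur i)) [])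

-- the 'n == 0 and current is None' yield of None is excluded by Pre_ (not a set of ints)
def clique_recursive (n : Int) (node_edges : List (Int × List Int)) (current : Option (List Int)) : List (List Int) :=
  match current with
  | none =>
    node_edges.foldl
      (fun acc p => acc ++ cliqueGoA node_edges (cliqueFuel node_edges) (p.1 - 1) [p.1]) []
  | some cur => cliqueGoA node_edges (cliqueFuel node_edges) n cur

-- ===== PORT B =====
-- initial candidate set: intersection of the members' neighborhoods (Source B's seed loop)
def cliqueCands (ne : List (Int × List Int)) (cur : List Int) : List Int :=
  match cur with
  | [] => []
  | c0 :: rest => rest.foldl (fun cands e => PySem.Set.inter cands (cliqueAdj ne e)) (cliqueAdj ne c0)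

-- Source B's grow: members plus carried candidate set, pruned at k < 0
def cliqueGoB (ne : List (Int × List Int)) : Nat → Int → List Int → List Int → List (List Int)
  | 0, _, _, _ => []
  | fuel+1, k, mem, cands =>
    if k = 0 then [mem]
    else if k < 0 then []
    else cands.foldl
      (fun acc i => acc ++ cliqueGoB ne fuel (k - 1) (PySem.Set.add mem i)
        (PySem.Set.inter cands (cliqueAdj ne i))) []

def clique_recursive_alt (n : Int) (node_edges : List (Int × List Int)) (current : Option (List Int)) : List (List Int) :=
  match current with
  | none =>
    node_edges.foldl
      (fun acc p => acc ++ cliqueGoB node_edges (cliqueFuel node_edges) (p.1 - 1) [p.1]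
        (cliqueAdj node_edges p.1)) []
  | some cur => cliqueGoB node_edges (cliqueFuel node_edges) n cur (cliqueCands node_edges cur)

-- ===== PRECONDITION & SPEC =====
-- Pre_ excludes (i) inputs on which Python A recurses forever and dies with RecursionError:
-- a self-looped node (a node in its own neighbor set) that is a start node (current None) or
-- lies in the intersection of the current members' neighborhoods; and (ii) n = 0 with
-- current None, on which A yields None, which is not a set of ints.
def Pre_clique_recursive (n : Int) (node_edges : List (Int × List Int)) (current : Option (List Int)) : Prop :=
  match current with
  | none => n ≠ 0 ∧ ∀ p ∈ node_edges, p.1 ∉ (PySem.Dict.mk node_edges).getD p.1 []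
  | some cur => cur = [] ∨
      ∀ p ∈ node_edges, p.1 ∈ (PySem.Dict.mk node_edges).getD p.1 [] →
        ∃ e ∈ cur, p.1 ∉ (PySem.Dict.mk node_edges).getD e []

instance (n : Int) (node_edges : List (Int × List Int)) (current : Option (List Int)) : Decidable (Pre_clique_recursive n node_edges current) := by unfold Pre_clique_recursive; cases current <;> infer_instance

def pvWitness_clique_recursive : Int × (List (Int × List Int)) × Option (List Int) :=
  (2, [(1, [2]), (2, [1])], none)

def Spec_clique_recursive (n : Int) (node_edges : List (Int × List Int)) (current : Option (List Int)) (out : List (List Int)) : Prop := out = clique_recursive_alt n node_edges current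
instance (n : Int) (node_edges : List (Int × List Int)) (current : Option (List Int)) (out : List (List Int)) : Decidable (Spec_clique_recursive n node_edges current out) := by unfold Spec_clique_recursive; infer_instance

-- ===== CLAIM (what is proved, stated in full; the proofs are below) =====
def Claim_equal_clique_recursive : Prop := ∀ (n : Int) (node_edges : List (Int × List Int)) (current : Option (List Int)), Dom_clique_recursive n node_edges current → Pre_clique_recursive n node_edges current → Spec_clique_recursive n node_edges current (clique_recursive n node_edges current)

-- ===== LEMMAS AND PROOFS =====

theorem clique_inter_eq_self_of_subset (s t : List Int) (h : ∀ x ∈ s, x ∈ t) :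
    PySem.Set.inter s t = s := by
  have hdef : PySem.Set.inter s t = s.filter (fun x => t.contains x) := rfl
  rw [hdef, List.filter_eq_self]
  intro x hx
  simpa using h x hx

theorem clique_inter_self (s : List Int) : PySem.Set.inter s s = s :=
  clique_inter_eq_self_of_subset s s (fun _ h => h)

-- A's option-valued fold, once started, is the plain intersection fold
theorem clique_foldA_some (l : List (List Int)) (s0 : List Int) :
    l.foldl (fun s es => some (PySem.Set.inter (s.getD es) es)) (some s0)
      = some (l.foldl PySem.Set.inter s0) := by
  induction l generalizing s0 with
  | nil => rfl
  | cons es rest ih => simp [List.foldl_cons, ih]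

-- membership in the candidate fold forces membership in the seed and every folded set
theorem clique_mem_foldl_inter (ne : List (Int × List Int)) (x : Int) :
    ∀ (l : List Int) (init : List Int),
      x ∈ l.foldl (fun cands e => PySem.Set.inter cands (cliqueAdj ne e)) init →
      x ∈ init ∧ ∀ e ∈ l, x ∈ cliqueAdj ne e := by
  intro l
  induction l with
  | nil => intro init h; exact ⟨h, by simp⟩
  | cons e rest ih =>
    intro init h
    rcases ih _ h with ⟨hmem, hall⟩
    rw [PySem.Set.mem_inter] at hmem
    refine ⟨hmem.1, ?_⟩
    intro e' he'
    rcases List.mem_cons.mp he' with rfl | he'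
    · exact hmem.2
    · exact hall e' he'

-- the carried candidate set narrows exactly as A's recomputed intersection
theorem clique_cands_add (ne : List (Int × List Int)) (c0 : Int) (rest : List Int) (i : Int) :
    cliqueCands ne (PySem.Set.add (c0 :: rest) i)
      = PySem.Set.inter (cliqueCands ne (c0 :: rest)) (cliqueAdj ne i) := by
  by_cases hmem : i ∈ c0 :: rest
  · rw [PySem.Set.add_of_mem hmem]
    refine (clique_inter_eq_self_of_subset _ _ ?_).symm
    intro x hx
    rcases clique_mem_foldl_inter ne x rest (cliqueAdj ne c0) hx with ⟨h0, hall⟩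
    rcases List.mem_cons.mp hmem with rfl | hi
    · exact h0
    · exact hall i hi
  · rw [PySem.Set.add_of_not_mem hmem]
    show cliqueCands ne (c0 :: (rest ++ [i])) = _
    simp [cliqueCands, List.foldl_append]

theorem clique_goA_neg (ne : List (Int × List Int)) :
    ∀ (fuel : Nat) (n : Int) (cur : List Int), n < 0 → cliqueGoA ne fuel n cur = [] := by
  intro fuel
  induction fuel with
  | zero => intro n cur _; rfl
  | succ f ih =>
    intro n cur hn
    show (if n = 0 then [cur] else []) ++ _ = _
    rw [if_neg (by omega)]
    cases hfold : (cur.map (cliqueAdj ne)).foldl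
        (fun s es => some (PySem.Set.inter (s.getD es) es)) (none : Option (List Int)) with
    | none => simp [hfold]
    | some s =>
      simp only [hfold, List.nil_append]
      have hz : ∀ (l : List Int) (a : List (List Int)),
          l.foldl (fun acc i => acc ++ cliqueGoA ne f (n - 1) (PySem.Set.add cur i)) a = a := by
        intro l
        induction l with
        | nil => intro a; rfl
        | cons x xs ihx => intro a; simp [List.foldl_cons, ih (n - 1) _ (by omega)]
      exact hz s []

-- main invariant: A's level equals B's level with the carried candidate set
theorem clique_goA_eq_goB (ne : List (Int × List Int)) :
    ∀ (fuel : Nat) (n : Int) (cur : List Int),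
      cliqueGoA ne fuel n cur = cliqueGoB ne fuel n cur (cliqueCands ne cur) := by
  intro fuel
  induction fuel with
  | zero => intro n cur; rfl
  | succ f ih =>
    intro n cur
    cases cur with
    | nil =>
      show (if n = 0 then [([] : List Int)] else []) ++ _ = _
      by_cases hn : n = 0
      · simp [hn, cliqueGoB]
      · by_cases hneg : n < 0 <;> simp [hn, hneg, cliqueGoB, cliqueCands]
    | cons c0 rest =>
      have hfold : ((c0 :: rest).map (cliqueAdj ne)).foldl
          (fun s es => some (PySem.Set.inter (s.getD es) es)) (none : Option (List Int))
          = some (cliqueCands ne (c0 :: rest)) := by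
        simp only [List.map_cons, List.foldl_cons, Option.getD_none, clique_inter_self]
        rw [clique_foldA_some]
        simp [cliqueCands, List.foldl_map]
      show (if n = 0 then [c0 :: rest] else []) ++ _ = _
      rw [show (cliqueGoB ne (f+1) n (c0 :: rest) (cliqueCands ne (c0 :: rest)))
            = (if n = 0 then [c0 :: rest]
               else if n < 0 then []
               else (cliqueCands ne (c0 :: rest)).foldl
                 (fun acc i => acc ++ cliqueGoB ne f (n - 1) (PySem.Set.add (c0 :: rest) i)
                   (PySem.Set.inter (cliqueCands ne (c0 :: rest)) (cliqueAdj ne i))) []) from rfl]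
      simp only [hfold]
      by_cases hn : n = 0
      · subst hn
        rw [if_pos rfl, if_pos rfl]
        have hz : ∀ (l : List Int) (a : List (List Int)),
            l.foldl (fun acc i => acc ++ cliqueGoA ne f ((0:Int) - 1) (PySem.Set.add (c0 :: rest) i)) a = a := by
          intro l
          induction l with
          | nil => intro a; rfl
          | cons x xs ihx =>
            intro a
            rw [List.foldl_cons,
              clique_goA_neg ne f ((0:Int) - 1) (PySem.Set.add (c0 :: rest) x) (by norm_num),
              List.append_nil]
            exact ihx a
        rw [hz]
        simp
      · rw [if_neg hn, if_neg hn]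
        by_cases hneg : n < 0
        · rw [if_pos hneg]
          have hz : ∀ (l : List Int) (a : List (List Int)),
              l.foldl (fun acc i => acc ++ cliqueGoA ne f (n - 1) (PySem.Set.add (c0 :: rest) i)) a = a := by
            intro l
            induction l with
            | nil => intro a; rfl
            | cons x xs ihx =>
              intro a
              rw [List.foldl_cons,
                clique_goA_neg ne f (n - 1) (PySem.Set.add (c0 :: rest) x) (by omega),
                List.append_nil]
              exact ihx a
          simp [hz]
        · rw [if_neg hneg, List.nil_append]
          have hcong : ∀ (l : List Int) (a : List (List Int)),
              l.foldl (fun acc i => acc ++ cliqueGoA ne f (n - 1) (PySem.Set.add (c0 :: rest) i)) a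
                = l.foldl (fun acc i => acc ++ cliqueGoB ne f (n - 1) (PySem.Set.add (c0 :: rest) i)
                    (PySem.Set.inter (cliqueCands ne (c0 :: rest)) (cliqueAdj ne i))) a := by
            intro l
            induction l with
            | nil => intro a; rfl
            | cons x xs ihx =>
              intro a
              simp only [List.foldl_cons]
              rw [ih (n - 1) (PySem.Set.add (c0 :: rest) x), clique_cands_add]
              exact ihx _
          exact hcong _ []

-- ===== VERDICT (by name: the statement is the Claim_ definition above) =====
theorem clique_recursive_spec : Claim_equal_clique_recursive := by
  unfold Claim_equal_clique_recursive
  intro n ne current _ _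
  unfold Spec_clique_recursive clique_recursive clique_recursive_alt
  cases current with
  | none =>
    have h : ∀ (l : List (Int × List Int)) (a : List (List Int)),
        l.foldl (fun acc p => acc ++ cliqueGoA ne (cliqueFuel ne) (p.1 - 1) [p.1]) a
          = l.foldl (fun acc p => acc ++ cliqueGoB ne (cliqueFuel ne) (p.1 - 1) [p.1]
              (cliqueAdj ne p.1)) a := by
      intro l
      induction l with
      | nil => intro a; rfl
      | cons q qs ih2 =>
        intro a
        simp only [List.foldl_cons]
        rw [show cliqueGoA ne (cliqueFuel ne) (q.1 - 1) [q.1]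
              = cliqueGoB ne (cliqueFuel ne) (q.1 - 1) [q.1] (cliqueAdj ne q.1) from
            clique_goA_eq_goB ne (cliqueFuel ne) (q.1 - 1) [q.1]]
        exact ih2 _
    exact h ne []
  | some cur => exact clique_goA_eq_goB ne (cliqueFuel ne) n cur
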